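-- pv_equiv track=rewrite | github.com/MaxwellMarcus/CalendarGUI | google_calendar.py | get_time_from_datetime
-- ===== SOURCE A (Python) =====
-- def get_time_from_datetime(dt):
--     final = ''
--     started = False
--     for i in dt:
--         if i == '-':
--             started = False
--         if started:
--             final += i
--         if i == 'T':
--             started = True
--     return final
-- ===== SOURCE B (Python) =====
-- def get_time_from_datetime(dt):
--     return ''.join(part[part.index('T') + 1:] if 'T' in part else ''
--                    for part in dt.split('-'))
-- ===== Notes on version B (the rewrite author's own statement) =====
-- stated objective: simpler
-- what changed: Replaces the character-by-character state machine (a started flag cleared at each dash and set at each T) with a single split-and-slice expression: split the string at dashes, keep the text after the first T of each segment that has one, and join the pieces.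
import Mathlib
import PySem

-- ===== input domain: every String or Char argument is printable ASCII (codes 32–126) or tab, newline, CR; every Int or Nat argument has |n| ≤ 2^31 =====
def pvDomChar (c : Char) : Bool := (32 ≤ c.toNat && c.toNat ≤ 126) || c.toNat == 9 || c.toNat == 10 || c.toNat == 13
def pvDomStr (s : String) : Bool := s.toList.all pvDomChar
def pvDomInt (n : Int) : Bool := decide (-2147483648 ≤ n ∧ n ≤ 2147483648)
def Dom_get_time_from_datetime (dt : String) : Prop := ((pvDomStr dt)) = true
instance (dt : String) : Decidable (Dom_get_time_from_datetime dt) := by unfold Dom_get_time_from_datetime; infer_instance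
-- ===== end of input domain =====

-- B replaces A's char-by-char state machine with split-on-'-' / slice-after-first-'T' / join (objective: simpler).

-- ===== PORT A =====
-- the loop body: '-' clears started, a started char is appended, 'T' sets started
def pvStepA (s : List Char × Bool) (i : Char) : List Char × Bool :=
  let started1 := if i = '-' then false else s.2
  let final := if started1 then s.1 ++ [i] else s.1
  let started2 := if i = 'T' then true else started1
  (final, started2)

def get_time_from_datetime (dt : String) : String :=
  String.mk (dt.toList.foldl pvStepA ([], false)).1

-- ===== PORT B =====
def get_time_from_datetime_alt (dt : String) : String :=
  String.mk (((dt.toList.splitOn '-').map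
    (fun part => if 'T' ∈ part then part.drop (part.idxOf 'T' + 1) else [])).flatten)

-- ===== PRECONDITION & SPEC =====
def Spec_get_time_from_datetime (dt : String) (out : String) : Prop := out = get_time_from_datetime_alt dt
instance (dt : String) (out : String) : Decidable (Spec_get_time_from_datetime dt out) := by unfold Spec_get_time_from_datetime; infer_instance

-- ===== CLAIM (what is proved, stated in full; the proofs are below) =====
def Claim_equal_get_time_from_datetime : Prop := ∀ (dt : String), Dom_get_time_from_datetime dt → Spec_get_time_from_datetime dt (get_time_from_datetime dt)

-- ===== LEMMAS AND PROOFS =====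

-- A's loop as a structural recursion on the characters, carrying the 'started' flag
def pvRunA : List Char → Bool → List Char
  | [], _ => []
  | c :: cs, b =>
      let b1 := if c = '-' then false else b
      let out : List Char := if b1 then [c] else []
      let b2 := if c = 'T' then true else b1
      out ++ pvRunA cs b2

-- B's per-segment contribution
def pvSeg (part : List Char) : List Char :=
  if 'T' ∈ part then part.drop (part.idxOf 'T' + 1) else []

theorem pvFoldl_runA (cs : List Char) : ∀ (acc : List Char) (b : Bool),
    (cs.foldl pvStepA (acc, b)).1 = acc ++ pvRunA cs b := by
  induction cs with
  | nil => intro acc b; simp [pvRunA]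
  | cons c cs ih =>
      intro acc b
      simp only [List.foldl_cons, pvStepA, pvRunA]
      by_cases hd : c = '-' <;> by_cases hb : b <;> by_cases ht : c = 'T' <;>
        simp [hd, hb, ht, ih]

theorem pvSeg_cons_ne (c : Char) (p : List Char) (hT : c ≠ 'T') :
    pvSeg (c :: p) = pvSeg p := by
  unfold pvSeg
  by_cases h : 'T' ∈ p
  · simp [h, List.mem_cons, hT.symm, hT]
  · have : 'T' ∉ c :: p := by simp [List.mem_cons, hT.symm, h]
    simp [h, this]

-- the core invariant: runA with flag false is B's whole expression; with flag true it is
-- the current (first) segment verbatim followed by B's expression over the later segments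
theorem pvMain (cs : List Char) :
    (pvRunA cs false = ((cs.splitOn '-').map pvSeg).flatten) ∧
    (∀ p ps, cs.splitOn '-' = p :: ps → pvRunA cs true = p ++ (ps.map pvSeg).flatten) := by
  induction cs with
  | nil =>
      constructor
      · simp [pvRunA, List.splitOn, List.splitOnP, List.splitOnP.go, pvSeg]
      · intro p ps h
        simp [List.splitOn, List.splitOnP, List.splitOnP.go] at h
        obtain ⟨h1, h2⟩ := h
        subst h1; subst h2
        simp [pvRunA]
  | cons c cs ih =>
      obtain ⟨p, ps, hsp⟩ : ∃ p ps, cs.splitOn '-' = p :: ps := by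
        rcases h : cs.splitOn '-' with _ | ⟨p, ps⟩
        · exact absurd h (List.splitOnP_ne_nil _ cs)
        · exact ⟨p, ps, rfl⟩
      have hcons : (c :: cs).splitOn '-' =
          if c = '-' then [] :: cs.splitOn '-' else (cs.splitOn '-').modifyHead (c :: ·) := by
        simpa [List.splitOn] using List.splitOnP_cons (· == '-') c cs
      by_cases hd : c = '-'
      · -- '-' : flag cleared, a fresh empty segment starts
        have h1 : pvRunA (c :: cs) false = pvRunA cs false := by simp [pvRunA, hd]
        have h2 : pvRunA (c :: cs) true = pvRunA cs false := by simp [pvRunA, hd]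
        refine ⟨?_, ?_⟩
        · rw [h1, ih.1, hcons]; simp [hd, pvSeg]
        · intro q qs hq
          rw [hcons] at hq; simp [hd] at hq
          rw [h2, ih.1]
          simp [hq.1, ← hq.2]
      · have hcons' : (c :: cs).splitOn '-' = (c :: p) :: ps := by
          rw [hcons]; simp [hd, hsp]
        refine ⟨?_, ?_⟩
        · by_cases ht : c = 'T'
          · -- first 'T' of the segment: start collecting, it is itself dropped
            have h1 : pvRunA (c :: cs) false = pvRunA cs true := by simp [pvRunA, hd, ht]
            rw [h1, ih.2 p ps hsp, hcons']
            simp [pvSeg, ht]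
          · have h1 : pvRunA (c :: cs) false = pvRunA cs false := by simp [pvRunA, hd, ht]
            rw [h1, ih.1, hcons', hsp]
            simp [pvSeg_cons_ne c p ht]
        · intro q qs hq
          rw [hcons'] at hq
          injection hq with hq1 hq2
          have h1 : pvRunA (c :: cs) true = c :: pvRunA cs true := by
            by_cases ht : c = 'T' <;> simp [pvRunA, hd, ht]
          rw [h1, ih.2 p ps hsp, ← hq1, ← hq2]
          simp

-- ===== VERDICT (by name: the statement is the Claim_ definition above) =====
theorem get_time_from_datetime_spec : Claim_equal_get_time_from_datetime := by
  intro dt _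
  unfold Spec_get_time_from_datetime get_time_from_datetime get_time_from_datetime_alt
  rw [pvFoldl_runA, (pvMain dt.toList).1]
  rfl
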